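-- pv_equiv track=rewrite | github.com/daheekwon/C3 | src/score_util_pub.py | fold_mask
-- ===== SOURCE A (Python) =====
-- from collections import defaultdict
--
-- def fold_mask(mask):
--     new_mask = defaultdict(list)
--     n_layer = (len(mask)-1)//2
--     for i in range(len(mask)):
--         if i < n_layer: key = 'down'
--         elif i == n_layer: key = 'mid'
--         else: key = 'up'
--         if i in range(len(mask)):
--             new_mask[key].append(mask[i])
--         else:
--             new_mask[key].append([])
--
--     return new_mask
-- ===== SOURCE B (Python) =====
-- from collections import defaultdict
--
-- def fold_mask(mask):
--     new_mask = defaultdict(list)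
--     if not mask:
--         return new_mask
--     n_layer = (len(mask) - 1) // 2
--     if n_layer > 0:
--         new_mask['down'] = mask[:n_layer]
--     new_mask['mid'] = [mask[n_layer]]
--     if n_layer + 1 < len(mask):
--         new_mask['up'] = mask[n_layer + 1:]
--     return new_mask
-- ===== Notes on version B (the rewrite author's own statement) =====
-- stated objective: simpler
-- what changed: Replaces A's per-index loop with a three-way key branch and repeated appends by computing the layer boundary once and assigning the three buckets as contiguous slices (mask[:n], [mask[n]], mask[n+1:]), each inserted at most once.
import Mathlib
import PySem

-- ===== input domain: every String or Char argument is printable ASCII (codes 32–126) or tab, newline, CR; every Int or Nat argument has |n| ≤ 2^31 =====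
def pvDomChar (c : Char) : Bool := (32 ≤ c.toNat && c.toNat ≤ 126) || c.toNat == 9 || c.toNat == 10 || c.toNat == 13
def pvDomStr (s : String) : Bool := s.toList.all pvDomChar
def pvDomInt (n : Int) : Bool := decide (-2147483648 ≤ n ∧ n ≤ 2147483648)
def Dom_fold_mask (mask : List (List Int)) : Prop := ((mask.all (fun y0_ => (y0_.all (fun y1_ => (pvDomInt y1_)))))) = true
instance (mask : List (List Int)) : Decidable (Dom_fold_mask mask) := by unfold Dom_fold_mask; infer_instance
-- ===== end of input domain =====

-- B replaces A's index loop with a branch per element by three contiguous slices assigned once each (objective: simpler).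

-- ===== PORT A =====
def fold_mask (mask : List (List Int)) : List (String × List (List Int)) :=
  let n_layer : Int := PySem.Int.floordiv ((mask.length : Int) - 1) 2
  ((PySem.List.pyRange 0 (mask.length : Int)).foldl (fun d i =>
      let key : String := if i < n_layer then "down" else if i = n_layer then "mid" else "up"
      if i ∈ PySem.List.pyRange 0 (mask.length : Int) then
        d.modify key [] (fun l => l ++ [(PySem.List.pyGet? mask i).getD []])
      else
        d.modify key [] (fun l => l ++ [[]]))
    PySem.Dict.empty).items

-- ===== PORT B =====
def fold_mask_alt (mask : List (List Int)) : List (String × List (List Int)) :=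
  if mask = [] then [] else
  let n_layer : Int := PySem.Int.floordiv ((mask.length : Int) - 1) 2
  let d0 : PySem.Dict String (List (List Int)) := PySem.Dict.empty
  let d1 := if 0 < n_layer then d0.insert "down" (PySem.List.slice mask none (some n_layer)) else d0
  let d2 := d1.insert "mid" [(PySem.List.pyGet? mask n_layer).getD []]
  let d3 := if n_layer + 1 < (mask.length : Int) then d2.insert "up" (PySem.List.slice mask (some (n_layer + 1)) none) else d2
  d3.items

-- ===== PRECONDITION & SPEC =====
def Spec_fold_mask (mask : List (List Int)) (out : List (String × List (List Int))) : Prop := out = fold_mask_alt mask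
instance (mask : List (List Int)) (out : List (String × List (List Int))) : Decidable (Spec_fold_mask mask out) := by unfold Spec_fold_mask; infer_instance

-- ===== CLAIM (what is proved, stated in full; the proofs are below) =====
def Claim_equal_fold_mask : Prop := ∀ (mask : List (List Int)), Dom_fold_mask mask → Spec_fold_mask mask (fold_mask mask)

-- ===== LEMMAS AND PROOFS =====

-- a run of appends to ONE key is a single insert of the concatenation
theorem fold_seg (k : String) (g : Nat → List Int) (is : List Nat)
    (d : PySem.Dict String (List (List Int))) (h : is ≠ []) :
    is.foldl (fun d j => d.modify k [] (fun l => l ++ [g j])) d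
      = d.insert k (d.getD k [] ++ is.map g) := by
  induction is generalizing d with
  | nil => cases h rfl
  | cons a t ih =>
    by_cases ht : t = []
    · subst ht; simp [PySem.Dict.modify]
    · rw [List.foldl_cons, ih _ ht]
      simp [PySem.Dict.modify, PySem.Dict.insert_insert_self, PySem.Dict.getD_insert_self]

theorem map_getD_range' (mask : List (List Int)) (a m : Nat) (h : a + m ≤ mask.length) :
    (List.range' a m).map (fun j => mask.getD j []) = (mask.drop a).take m := by
  induction m generalizing a with
  | zero => simp
  | succ m ih =>
    rw [List.range'_succ, List.map_cons, ih (a + 1) (by omega)]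
    have ha : a < mask.length := by omega
    rw [List.drop_eq_getElem_cons ha, List.take_succ_cons, List.getD_eq_getElem mask [] ha]

-- ===== VERDICT (by name: the statement is the Claim_ definition above) =====
theorem fold_mask_spec : Claim_equal_fold_mask := by
  intro mask _
  unfold Spec_fold_mask fold_mask fold_mask_alt
  by_cases h0 : mask = []
  · subst h0; rfl
  · simp only [if_neg h0]
    have hL : 1 ≤ mask.length := by
      cases mask with | nil => exact absurd rfl h0 | cons a t => simp
    set L := mask.length with hLdef
    obtain ⟨nn, hnn⟩ : ∃ nn : Nat, nn = (L - 1) / 2 := ⟨_, rfl⟩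
    have hcast : ((L : Int) - 1) = ((L - 1 : Nat) : Int) := by omega
    have hn : PySem.Int.floordiv ((L : Int) - 1) 2 = (nn : Int) := by
      rw [hcast, hnn]; exact_mod_cast PySem.Int.floordiv_natCast (L - 1) 2
    rw [hn]
    have hnnL : nn < L := by omega
    -- normalise A's fold to a fold over List.range L with Nat indices
    rw [PySem.List.pyRange_zero_natCast L, List.foldl_map]
    rw [PySem.List.foldl_congr_mem (List.range L) _
        (fun d j => d.modify (if j < nn then "down" else if j = nn then "mid" else "up")
          [] (fun l => l ++ [mask.getD j []])) _ ?_]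
    · -- split the range into the three key segments
      have hsp : List.range L
          = (List.range' 0 nn ++ List.range' nn 1) ++ List.range' (nn + 1) (L - (nn + 1)) := by
        rw [List.range_eq_range', List.append_assoc]
        have e2 : List.range' nn 1 ++ List.range' (nn + 1) (L - (nn + 1))
            = List.range' nn (L - nn) := by
          have := List.range'_append (s := nn) (m := 1) (n := L - (nn + 1)) (step := 1)
          simp only [Nat.mul_one] at this
          rw [this]; congr 1; omega
        rw [e2]
        have := List.range'_append (s := 0) (m := nn) (n := L - nn) (step := 1)
        simp only [Nat.one_mul, Nat.zero_add] at this
        rw [this]; congr 1; omega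
      rw [hsp, List.foldl_append, List.foldl_append]
      -- down segment
      have hdown : (List.range' 0 nn).foldl
          (fun d j => d.modify (if j < nn then "down" else if j = nn then "mid" else "up")
            [] (fun l => l ++ [mask.getD j []])) PySem.Dict.empty
          = if 0 < (nn : Int) then
              PySem.Dict.empty.insert "down" (PySem.List.slice mask none (some (nn : Int)))
            else PySem.Dict.empty := by
        by_cases hz : nn = 0
        · subst hz; simp
        · rw [PySem.List.foldl_congr_mem _ _
              (fun d j => d.modify "down" [] (fun l => l ++ [mask.getD j []])) _ ?_]
          · rw [fold_seg "down" _ _ _ (by simp [hz]), if_pos (by exact_mod_cast Nat.pos_of_ne_zero hz)]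
            rw [PySem.Dict.getD_empty, List.nil_append,
              map_getD_range' mask 0 nn (by omega),
              PySem.List.slice_to mask (by positivity)]
            simp
          · intro acc x hx
            have : x < nn := by
              have := List.mem_range'_1.mp hx; omega
            simp [this]
      rw [hdown]
      -- the "mid" singleton step
      have hgetnn : (PySem.List.pyGet? mask (nn : Int)).getD [] = mask.getD nn [] := by
        rw [PySem.List.pyGet?_natCast, List.getD_eq_getElem?_getD]
      -- up segment and final comparison, by cases on the guards
      by_cases hz : nn = 0
      · subst hz
        simp only [Nat.cast_zero, lt_irrefl]
        by_cases hup : L = 1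
        · have : L - (0 + 1) = 0 := by omega
          rw [this]
          simp only [List.range'_zero, List.range'_one, List.foldl_nil, List.foldl_cons]
          have hg : ¬ ((0 : Int) + 1 < (L : Int)) := by omega
          rw [if_neg hg]
          have h00 : PySem.List.pyGet? mask (0 : Int) = mask[0]? := by
            simpa using PySem.List.pyGet?_natCast mask 0
          simp [PySem.Dict.modify, h00]
        · have hg : (0 : Int) + 1 < (L : Int) := by omega
          rw [if_pos hg]
          simp only [List.range'_one, List.foldl_cons, List.foldl_nil]
          rw [PySem.List.foldl_congr_mem _ _
              (fun d j => d.modify "up" [] (fun l => l ++ [mask.getD j []])) _ ?_]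
          · rw [fold_seg "up" (fun j => mask.getD j []) (List.range' (0 + 1) (L - (0 + 1))) _
                (by simp [List.range'_eq_nil_iff]; omega)]
            rw [map_getD_range' mask 1 (L - 1) (by omega)]
            have hslice : PySem.List.slice mask (some ((0 : Int) + 1)) none = mask.drop 1 := by
              rw [PySem.List.slice_from mask (by omega)]; rfl
            rw [hslice]
            have htake : (mask.drop 1).take (L - 1) = mask.drop 1 := by
              apply List.take_of_length_le; simp only [List.length_drop]; omega
            rw [htake]
            have h00 : PySem.List.pyGet? mask (0 : Int) = mask[0]? := by
              simpa using PySem.List.pyGet?_natCast mask 0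
            simp [PySem.Dict.modify, h00,
              PySem.Dict.getD_insert_of_ne _ _ _ (show ("up" : String) ≠ "mid" by decide)]
          · intro acc x hx
            have := List.mem_range'_1.mp hx
            have h1 : ¬ x < 0 := by omega
            have h2 : x ≠ 0 := by omega
            simp [h1, h2]
      · -- nn ≥ 1, hence L ≥ 3 and both "down" and "up" are present
        have hnpos : 0 < nn := Nat.pos_of_ne_zero hz
        have hL3 : 3 ≤ L := by omega
        rw [if_pos (by exact_mod_cast hnpos)]
        simp only [List.range'_one, List.foldl_cons, List.foldl_nil]
        have hg : (nn : Int) + 1 < (L : Int) := by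
          have : nn + 1 < L := by omega
          exact_mod_cast this
        rw [if_pos hg]
        rw [PySem.List.foldl_congr_mem _ _
            (fun d j => d.modify "up" [] (fun l => l ++ [mask.getD j []])) _ ?_]
        · rw [fold_seg "up" (fun j => mask.getD j []) (List.range' (nn + 1) (L - (nn + 1))) _
              (by simp [List.range'_eq_nil_iff]; omega)]
          rw [map_getD_range' mask (nn + 1) (L - (nn + 1)) (by omega)]
          have hslice : PySem.List.slice mask (some ((nn : Int) + 1)) none = mask.drop (nn + 1) := by
            rw [PySem.List.slice_from mask (by positivity)]
            have : ((nn : Int) + 1).toNat = nn + 1 := by omega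
            rw [this]
          rw [hslice]
          have htake : (mask.drop (nn + 1)).take (L - (nn + 1)) = mask.drop (nn + 1) := by
            apply List.take_of_length_le; simp only [List.length_drop]; omega
          rw [htake]
          simp [PySem.Dict.modify,
            PySem.Dict.getD_insert_of_ne _ _ _ (show ("mid" : String) ≠ "down" by decide),
            PySem.Dict.getD_insert_of_ne _ _ _ (show ("up" : String) ≠ "mid" by decide),
            PySem.Dict.getD_insert_of_ne _ _ _ (show ("up" : String) ≠ "down" by decide)]
        · intro acc x hx
          have := List.mem_range'_1.mp hx
          have h1 : ¬ x < nn := by omega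
          have h2 : x ≠ nn := by omega
          simp [h1, h2]
    · -- justify the per-index simplification of A's loop body
      intro acc j hj
      have hjL : j < L := List.mem_range.mp hj
      have hmem : (j : Int) ∈ PySem.List.pyRange 0 (L : Int) := by
        rw [PySem.List.mem_pyRange_one]
        constructor
        · positivity
        · exact_mod_cast hjL
      have hget : (PySem.List.pyGet? mask (j : Int)).getD [] = mask.getD j [] := by
        rw [PySem.List.pyGet?_natCast, List.getD_eq_getElem?_getD]
      have hmem2 : ((j : Int)) ∈ List.map (fun k : Nat => ((k : Int))) (List.range L) :=
        List.mem_map_of_mem hj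
      simp only [hget, Nat.cast_lt, Nat.cast_inj, if_pos hmem2]
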